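-- pv_equiv track=rewrite | github.com/mmh132/ProjectEuler | work/P448_2.py | lsieve
-- ===== SOURCE A (Python) =====
-- def lsieve(n):
--     primes = [1]*(n+1)
--     mobius = list(range(n+1))
--     for i in range(2, n+1):
--         if primes[i]:
--             mobius[i] *= -1
--             for k in range(i+i, n+1, i):
--                 mobius[k] *= -1
--                 primes[k] = 0
--             for k in range(i**2, n+1, i**2):
--                 mobius[k] = 0
--     return mobius
-- ===== SOURCE B (Python) =====
-- def lsieve(n):
--     if n < 0:
--         return []
--     # smallest-prime-factor table
--     spf = [0] * (n + 1)
--     for d in range(2, n + 1):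
--         if spf[d] == 0:
--             for k in range(d, n + 1, d):
--                 if spf[k] == 0:
--                     spf[k] = d
--     # Moebius values by one division step on the smallest prime factor
--     mu = [0] * (n + 1)
--     if n >= 1:
--         mu[1] = 1
--     for i in range(2, n + 1):
--         p = spf[i]
--         m = i // p
--         mu[i] = 0 if m % p == 0 else -mu[m]
--     return [i * mu[i] for i in range(n + 1)]
-- ===== Notes on version B (the rewrite author's own statement) =====
-- stated objective: alternative
-- what changed: A flips signs along every prime's multiples and zeroes multiples of each prime square in one multiplicative Eratosthenes-style sieve; B instead builds a smallest-prime-factor table with a plain sieve and then derives each Moebius value by a single dynamic-programming division step on the smallest prime factor, finally multiplying by the index.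
import Mathlib
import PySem

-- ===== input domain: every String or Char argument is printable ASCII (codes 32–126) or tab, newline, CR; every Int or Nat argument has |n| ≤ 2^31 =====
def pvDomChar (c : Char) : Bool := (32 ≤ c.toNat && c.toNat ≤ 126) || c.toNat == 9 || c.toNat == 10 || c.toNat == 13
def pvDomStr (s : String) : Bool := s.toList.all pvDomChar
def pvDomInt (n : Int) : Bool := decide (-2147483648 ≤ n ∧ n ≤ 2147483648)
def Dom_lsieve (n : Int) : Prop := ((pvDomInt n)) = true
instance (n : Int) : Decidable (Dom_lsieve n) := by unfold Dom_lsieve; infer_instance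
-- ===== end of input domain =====

-- B replaces A's multiplicative Eratosthenes-style sieve (sign flips per prime, zeroing per prime square)
-- by a smallest-prime-factor sieve followed by a one-division dynamic programming pass for the Möbius
-- values; objective: alternative (a genuinely different algorithm of comparable cost).

-- ===== PORT A =====
-- indices produced by the loops are always nonnegative and < n+1 = length, so pyGetD/pySetD are exact here
def lsieveStepA (n : Int) (st : List Int × List Int) (i : Int) : List Int × List Int :=
  if PySem.List.pyGetD st.1 i 0 ≠ 0 then
    let m1 := PySem.List.pySetD st.2 i (PySem.List.pyGetD st.2 i 0 * -1)
    let st2 := (PySem.List.pyRange (i + i) (n + 1) i).foldl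
      (fun st k => (PySem.List.pySetD st.1 k 0,
                    PySem.List.pySetD st.2 k (PySem.List.pyGetD st.2 k 0 * -1)))
      (st.1, m1)
    (st2.1, (PySem.List.pyRange (i ^ 2) (n + 1) (i ^ 2)).foldl
      (fun m k => PySem.List.pySetD m k 0) st2.2)
  else st

def lsieve (n : Int) : List Int :=
  let primes : List Int := List.replicate (n + 1).toNat 1
  let mobius : List Int := PySem.List.pyRange 0 (n + 1) 1
  let st := (PySem.List.pyRange 2 (n + 1) 1).foldl (lsieveStepA n) (primes, mobius)
  st.2

-- ===== PORT B =====
-- indices are again always in range; p = spf[i] is ≥ 2 whenever it is read (i ≥ 2 is in the table)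
def spfStepB (n : Int) (spf : List Int) (d : Int) : List Int :=
  if PySem.List.pyGetD spf d 0 = 0 then
    (PySem.List.pyRange d (n + 1) d).foldl
      (fun s k => if PySem.List.pyGetD s k 0 = 0 then PySem.List.pySetD s k d else s) spf
  else spf

def muStepB (spf : List Int) (mu : List Int) (i : Int) : List Int :=
  let p := PySem.List.pyGetD spf i 0
  let m := PySem.Int.floordiv i p
  PySem.List.pySetD mu i
    (if PySem.Int.mod m p = 0 then 0 else -(PySem.List.pyGetD mu m 0))

def lsieve_alt (n : Int) : List Int :=
  if n < 0 then []
  else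
    let spf := (PySem.List.pyRange 2 (n + 1) 1).foldl (spfStepB n)
      (List.replicate (n + 1).toNat 0)
    let mu0 : List Int := List.replicate (n + 1).toNat 0
    let mu1 := if n ≥ 1 then PySem.List.pySetD mu0 1 1 else mu0
    let mu := (PySem.List.pyRange 2 (n + 1) 1).foldl (muStepB spf) mu1
    (PySem.List.pyRange 0 (n + 1) 1).map (fun i => i * PySem.List.pyGetD mu i 0)

-- ===== PRECONDITION & SPEC =====
def Spec_lsieve (n : Int) (out : List Int) : Prop := out = lsieve_alt n
instance (n : Int) (out : List Int) : Decidable (Spec_lsieve n out) := by unfold Spec_lsieve; infer_instance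

-- ===== CLAIM (what is proved, stated in full; the proofs are below) =====
def Claim_equal_lsieve : Prop := ∀ (n : Int), Dom_lsieve n → Spec_lsieve n (lsieve n)

-- ===== LEMMAS AND PROOFS =====

lemma setgetD (L : List Int) (j : Nat) (v : Int) (i : Nat) : (L.set i v).getD j 0 = if i = j ∧ i < L.length then v else L.getD j 0 := by
  simp only [List.getD_eq_getElem?_getD, List.getElem?_set]
  by_cases h1 : i = j
  · subst h1
    by_cases h2 : i < L.length <;> simp [h2]
  · simp [h1]
lemma set_getD_self (L : List Int) (j : Nat) : L.set j (L.getD j 0) = L := by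
  by_cases h : j < L.length
  · apply List.ext_getElem
    · simp
    · intro i h1 h2
      simp only [List.getElem_set]
      split
      · rename_i he; subst he
        simp [List.getD_eq_getElem?_getD, List.getElem?_eq_getElem h]
      · rfl
  · exact List.set_eq_of_length_le (by omega)
lemma foldl_setg_length (g : Int → Int) (ks : List Int) (L : List Int) :
    (ks.foldl (fun L k => PySem.List.pySetD L k (g (PySem.List.pyGetD L k 0))) L).length
      = L.length := by
  induction ks generalizing L with
  | nil => rfl
  | cons k ks ih => simp [List.foldl_cons, ih, PySem.List.length_pySetD]

lemma foldl_setg_getD (g : Int → Int) (ks : List Int) (L : List Int)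
    (h0 : ∀ k ∈ ks, 0 ≤ k) (hnd : ks.Nodup) (j : Nat) (hj : j < L.length) :
    (ks.foldl (fun L k => PySem.List.pySetD L k (g (PySem.List.pyGetD L k 0))) L).getD j 0
      = if (j : Int) ∈ ks then g (L.getD j 0) else L.getD j 0 := by
  induction ks generalizing L with
  | nil => simp
  | cons k ks ih =>
    have hk0 : 0 ≤ k := h0 k (by simp)
    have hset : PySem.List.pySetD L k (g (PySem.List.pyGetD L k 0))
        = L.set k.toNat (g (L.getD k.toNat 0)) := by
      rw [PySem.List.pySetD_of_nonneg L _ hk0, PySem.List.pyGetD_of_nonneg L 0 hk0]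
    rw [List.foldl_cons, hset,
      ih _ (fun x hx => h0 x (by simp [hx])) hnd.of_cons (by simpa)]
    by_cases hmem : (j : Int) ∈ ks
    · have hne : k.toNat ≠ j := by
        intro he
        have : (j : Int) = k := by omega
        exact ((List.nodup_cons.mp hnd).1 (by simpa [this] using hmem)).elim
      simp [hmem, hne]
    · simp only [hmem, if_false, List.mem_cons]
      rw [setgetD]
      by_cases he : (j : Int) = k
      · have : k.toNat = j := by omega
        simp [this, he, hj]
      · have : k.toNat ≠ j := by omega
        simp [this, he]
lemma no_small_div_iff_prime (d : Nat) (hd : 2 ≤ d) :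
    ((∀ p, p.Prime → p < d → ¬(p ∣ d ∧ 2 * p ≤ d))) ↔ d.Prime := by
  constructor
  · intro h
    by_contra hnp
    have hpf := Nat.minFac_prime (by omega : d ≠ 1)
    have hdvd := Nat.minFac_dvd d
    have hne : d.minFac ≠ d := fun he => hnp (Nat.prime_def_minFac.mpr ⟨hd, he⟩)
    have hlt : d.minFac < d := lt_of_le_of_ne (Nat.minFac_le (by omega)) hne
    have h2 : 2 * d.minFac ≤ d := by
      obtain ⟨c, hc⟩ := hdvd
      have hc2 : 2 ≤ c := by
        rcases Nat.lt_or_ge c 2 with h | h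
        · interval_cases c <;> omega
        · exact h
      have h22 : 2 * d.minFac ≤ c * d.minFac := Nat.mul_le_mul_right _ hc2
      have : c * d.minFac = d.minFac * c := Nat.mul_comm _ _
      omega
    exact h d.minFac hpf hlt ⟨hdvd, h2⟩
  · intro hp p hpp hlt ⟨hdvd, _⟩
    have := (Nat.Prime.eq_one_or_self_of_dvd hp p hdvd)
    have := hpp.two_le
    omega

lemma moebius_minFac_step (k : Nat) (hk : 2 ≤ k) :
    (ArithmeticFunction.moebius k : Int)
      = if k.minFac ∣ k / k.minFac then 0
        else -(ArithmeticFunction.moebius (k / k.minFac) : Int) := by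
  have hpf := Nat.minFac_prime (by omega : k ≠ 1)
  have hdvd := Nat.minFac_dvd k
  have hk0 : k ≠ 0 := by omega
  split
  · rename_i h
    have hsq : k.minFac * k.minFac ∣ k := by
      obtain ⟨c, hc⟩ := h
      exact ⟨c, by rw [Nat.mul_assoc, ← hc, Nat.mul_div_cancel' hdvd]⟩
    have : ¬ Squarefree k := fun hs =>
      (Nat.squarefree_iff_prime_squarefree.mp hs) k.minFac hpf hsq
    simp [ArithmeticFunction.moebius_eq_zero_of_not_squarefree this]
  · rename_i h
    have hco : Nat.Coprime k.minFac (k / k.minFac) :=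
      (Nat.Prime.coprime_iff_not_dvd hpf).mpr h
    have hmul : k.minFac * (k / k.minFac) = k := Nat.mul_div_cancel' hdvd
    have := (ArithmeticFunction.isMultiplicative_moebius).map_mul_of_coprime hco
    rw [hmul] at this
    rw [this, ArithmeticFunction.moebius_apply_prime hpf]
    ring
def Pval (j k : Nat) : Int :=
  if ((Finset.range (j + 1)).filter (fun p => Nat.Prime p ∧ p ∣ k ∧ 2 * p ≤ k)) = ∅ then 1 else 0

def Mval (j k : Nat) : Int :=
  if ((Finset.range (j + 1)).filter (fun p => Nat.Prime p ∧ p * p ∣ k)) = ∅ then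
    (-1) ^ (((Finset.range (j + 1)).filter (fun p => Nat.Prime p ∧ p ∣ k)).card) * k
  else 0

lemma nodup_pyRange_pos (a b s : Int) (hs : 0 < s) : (PySem.List.pyRange a b s).Nodup := by
  rw [PySem.List.pyRange_of_pos a b hs]
  refine List.Nodup.map ?_ (List.nodup_range)
  intro x y h
  have : (x : Int) = y := by
    have := h
    nlinarith [this]
  exact_mod_cast this

lemma Mval_final (n k : Nat) (h1 : 1 ≤ k) (h2 : k ≤ n) :
    Mval n k = (k : Int) * (ArithmeticFunction.moebius k : Int) := by
  have hk0 : k ≠ 0 := by omega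
  have hdiv : ((Finset.range (n + 1)).filter (fun p => Nat.Prime p ∧ p ∣ k)) = k.primeFactors := by
    ext p
    simp only [Finset.mem_filter, Finset.mem_range, Nat.mem_primeFactors]
    constructor
    · rintro ⟨_, hp, hd⟩; exact ⟨hp, hd, hk0⟩
    · rintro ⟨hp, hd, _⟩
      exact ⟨by have := Nat.le_of_dvd (by omega) hd; omega, hp, hd⟩
  have hsq : (((Finset.range (n + 1)).filter (fun p => Nat.Prime p ∧ p * p ∣ k)) = ∅)
      ↔ Squarefree k := by
    rw [Finset.filter_eq_empty_iff, Nat.squarefree_iff_prime_squarefree]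
    constructor
    · intro h p hp hd
      have hlt : p < n + 1 := by
        have hpp : p ≤ p * p := Nat.le_mul_of_pos_left p hp.pos
        have := Nat.le_of_dvd (by omega) hd
        omega
      exact h (Finset.mem_range.mpr hlt) ⟨hp, hd⟩
    · intro h p _ ⟨hp, hd⟩
      exact h p hp hd
  unfold Mval
  by_cases hs : Squarefree k
  · rw [if_pos (hsq.mpr hs), hdiv]
    have hcard : k.primeFactors.card = ArithmeticFunction.cardFactors k := by
      rw [← (ArithmeticFunction.cardDistinctFactors_eq_cardFactors_iff_squarefree hk0).mpr hs]
      rw [ArithmeticFunction.cardDistinctFactors_apply]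
      rw [Nat.primeFactors, List.card_toFinset]
    rw [hcard, ArithmeticFunction.moebius_apply_of_squarefree hs]
    ring
  · rw [if_neg (fun he => hs (hsq.mp he))]
    rw [ArithmeticFunction.moebius_eq_zero_of_not_squarefree hs]
    ring
lemma Pval_succ (j k : Nat) :
    Pval (j + 1) k
      = if (j + 1).Prime ∧ (j + 1) ∣ k ∧ 2 * (j + 1) ≤ k then 0 else Pval j k := by
  unfold Pval
  rw [Finset.range_add_one, Finset.filter_insert]
  by_cases h : (j + 1).Prime ∧ (j + 1) ∣ k ∧ 2 * (j + 1) ≤ k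
  · simp [h]
  · simp [h]

lemma Mval_succ_prime (j k : Nat) (hp : (j + 1).Prime) :
    Mval (j + 1) k
      = if (j + 1) * (j + 1) ∣ k then 0
        else if (j + 1) ∣ k then -Mval j k else Mval j k := by
  unfold Mval
  rw [Finset.range_add_one, Finset.filter_insert, Finset.filter_insert]
  have hnm : (j + 1) ∉ Finset.range (j + 1) := by simp
  by_cases hsq : (j + 1) * (j + 1) ∣ k
  · rw [if_pos (show (j+1).Prime ∧ (j+1)*(j+1) ∣ k from ⟨hp, hsq⟩), if_pos hsq,
      if_neg (Finset.insert_ne_empty _ _)]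
  · have h1 : ¬((j+1).Prime ∧ (j+1)*(j+1) ∣ k) := fun hc => hsq hc.2
    rw [if_neg h1, if_neg hsq]
    by_cases hd : (j + 1) ∣ k
    · rw [if_pos (show (j+1).Prime ∧ (j+1) ∣ k from ⟨hp, hd⟩), if_pos hd]
      by_cases he : ((Finset.range (j + 1)).filter (fun p => Nat.Prime p ∧ p * p ∣ k)) = ∅
      · rw [if_pos he, if_pos he,
          Finset.card_insert_of_notMem (fun hm => hnm (Finset.mem_filter.mp hm).1)]
        ring
      · rw [if_neg he, if_neg he]
        ring
    · have h2 : ¬((j+1).Prime ∧ (j+1) ∣ k) := fun hc => hd hc.2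
      rw [if_neg h2, if_neg hd]

lemma Mval_succ_comp (j k : Nat) (hp : ¬(j + 1).Prime) :
    Mval (j + 1) k = Mval j k := by
  unfold Mval
  have h1 : ¬((j+1).Prime ∧ (j+1)*(j+1) ∣ k) := fun hc => hp hc.1
  have h2 : ¬((j+1).Prime ∧ (j+1) ∣ k) := fun hc => hp hc.1
  rw [Finset.range_add_one, Finset.filter_insert, Finset.filter_insert, if_neg h1, if_neg h2]

lemma Pval_one (k : Nat) : Pval 1 k = 1 := by
  unfold Pval
  rw [if_pos]
  rw [Finset.filter_eq_empty_iff]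
  intro p hp
  simp only [Finset.mem_range] at hp
  intro hc
  interval_cases p <;> simp_all [Nat.not_prime_zero, Nat.not_prime_one]

lemma Mval_one (k : Nat) : Mval 1 k = (k : Int) := by
  unfold Mval
  have h1 : ∀ (q : Nat → Prop) [DecidablePred q], (∀ p, p < 2 → ¬ (Nat.Prime p ∧ q p)) →
      ((Finset.range 2).filter (fun p => Nat.Prime p ∧ q p)) = ∅ := by
    intro q _ h
    rw [Finset.filter_eq_empty_iff]
    intro p hp
    exact h p (Finset.mem_range.mp hp)
  rw [h1 _ (by intro p hp hc; interval_cases p <;> simp_all [Nat.not_prime_zero, Nat.not_prime_one]),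
      h1 _ (by intro p hp hc; interval_cases p <;> simp_all [Nat.not_prime_zero, Nat.not_prime_one])]
  simp

lemma Mval_zero (j : Nat) : Mval j 0 = 0 := by
  unfold Mval
  split <;> ring

lemma Pval_self (j : Nat) (hj : 1 ≤ j) :
    (Pval j (j + 1) ≠ 0) ↔ (j + 1).Prime := by
  unfold Pval
  rw [← no_small_div_iff_prime (j + 1) (by omega)]
  constructor
  · intro h p hp hlt hc
    split at h
    · rename_i he
      rw [Finset.filter_eq_empty_iff] at he
      exact he (Finset.mem_range.mpr hlt) ⟨hp, hc⟩
    · exact h rfl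
  · intro h
    rw [if_pos]
    · simp
    · rw [Finset.filter_eq_empty_iff]
      intro p hp hc
      exact h p hc.1 (Finset.mem_range.mp hp) hc.2
def AState (n : Int) (j : Nat) : List Int × List Int :=
  (PySem.List.pyRange 2 ((j : Int) + 1) 1).foldl (lsieveStepA n)
    (List.replicate (n + 1).toNat 1, PySem.List.pyRange 0 (n + 1) 1)

lemma foldl_pair {α β γ : Type} (f : α → γ → α) (g : β → γ → β) (ks : List γ) (P : α) (M : β) :
    ks.foldl (fun st k => (f st.1 k, g st.2 k)) (P, M) = (ks.foldl f P, ks.foldl g M) := by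
  induction ks generalizing P M with
  | nil => rfl
  | cons k ks ih => simpa using ih (f P k) (g M k)

lemma foldl_pyRange_one_succ {α : Type} (f : α → Int → α) (a b : Int) (init : α) (h : a ≤ b) :
    (PySem.List.pyRange a (b + 1) 1).foldl f init
      = f ((PySem.List.pyRange a b 1).foldl f init) b := by
  rw [PySem.List.pyRange_one_succ_right h, List.foldl_append]; rfl

lemma dvd_shift (a x c : Int) (h : a ∣ c) : (a ∣ x - c) ↔ a ∣ x := by
  constructor
  · intro hh
    have := dvd_add hh h
    simpa using this
  · intro hh
    exact dvd_sub hh h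

lemma getD_pyRange0 (b : Int) (k : Nat) (hk : (k : Int) < b) :
    (PySem.List.pyRange 0 b 1).getD k 0 = (k : Int) := by
  have hlen := PySem.List.length_pyRange_one 0 b
  have hk' : k < (PySem.List.pyRange 0 b 1).length := by rw [hlen]; omega
  rw [List.getD_eq_getElem _ _ hk', PySem.List.getElem_pyRange_one]
  simp

set_option maxHeartbeats 2000000 in
lemma AInv (n : Int) (hn : 1 ≤ n) (j : Nat) (hj1 : 1 ≤ j) (hjn : (j : Int) ≤ n) :
    (AState n j).1.length = (n + 1).toNat ∧ (AState n j).2.length = (n + 1).toNat ∧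
    ∀ k : Nat, k < (n + 1).toNat →
      (AState n j).1.getD k 0 = Pval j k ∧ (AState n j).2.getD k 0 = Mval j k := by
  have hN : (((n + 1).toNat : Int)) = n + 1 := Int.toNat_of_nonneg (by omega)
  induction j with
  | zero => omega
  | succ j ih =>
    by_cases hj0 : j = 0
    · subst hj0
      have hr : PySem.List.pyRange 2 (((0 + 1 : Nat) : Int) + 1) 1 = [] := by
        have : (((0 + 1 : Nat) : Int) + 1) = 2 := by norm_num
        rw [this]
        exact PySem.List.pyRange_one_eq_nil (le_refl 2)
      have hA : AState n 1 = (List.replicate (n + 1).toNat 1, PySem.List.pyRange 0 (n + 1) 1) := by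
        unfold AState
        rw [hr]
        rfl
      rw [hA]
      refine ⟨by simp, by simp [PySem.List.length_pyRange_one], ?_⟩
      intro k hk
      constructor
      · rw [List.getD_eq_getElem _ _ (by simpa using hk), List.getElem_replicate, Pval_one]
      · rw [getD_pyRange0 (n + 1) k (by omega), Mval_one]
    -- inductive step
    · have hj1' : 1 ≤ j := by omega
      have hjn' : (j : Int) ≤ n := by push_cast at hjn ⊢; omega
      obtain ⟨ihP, ihM, ihE⟩ := ih hj1' hjn'
      have hstep : AState n (j + 1) = lsieveStepA n (AState n j) ((j : Int) + 1) := by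
        unfold AState
        have hc : (((j + 1 : Nat) : Int) + 1) = ((j : Int) + 1) + 1 := by push_cast; ring
        rw [hc, foldl_pyRange_one_succ (lsieveStepA n) 2 ((j : Int) + 1) _ (by omega)]
      set st := AState n j with hst
      set I : Int := (j : Int) + 1 with hI
      have hI0 : (0 : Int) < I := by omega
      have hIn : I ≤ n := by push_cast at hjn; omega
      have hIt : I.toNat = j + 1 := by omega
      have hjN : j + 1 < (n + 1).toNat := by omega
      have hcondval : PySem.List.pyGetD st.1 I 0 = Pval j (j + 1) := by
        rw [PySem.List.pyGetD_of_nonneg st.1 0 (le_of_lt hI0), hIt]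
        exact (ihE (j + 1) hjN).1
      -- facts about the two ranges
      have hIc : I = (((j + 1 : Nat)) : Int) := by push_cast; ring
      have hsq : I ^ 2 = ((((j + 1) * (j + 1) : Nat)) : Int) := by push_cast; ring
      have hmem2 : ∀ k : Nat, ((k : Int) ∈ PySem.List.pyRange (I + I) (n + 1) I)
          ↔ ((j + 1) ∣ k ∧ 2 * (j + 1) ≤ k ∧ (k : Int) < n + 1) := by
        intro k
        rw [PySem.List.mem_pyRange_iff_of_pos hI0,
          dvd_shift I (k : Int) (I + I) ⟨2, by ring⟩, hIc, Int.natCast_dvd_natCast]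
        exact ⟨fun ⟨a, b, c⟩ => ⟨c, by omega, b⟩, fun ⟨a, b, c⟩ => ⟨by omega, c, a⟩⟩
      have hmem3 : ∀ k : Nat, ((k : Int) ∈ PySem.List.pyRange (I ^ 2) (n + 1) (I ^ 2))
          ↔ ((j + 1) * (j + 1) ∣ k ∧ (j + 1) * (j + 1) ≤ k ∧ (k : Int) < n + 1) := by
        intro k
        rw [PySem.List.mem_pyRange_iff_of_pos (show (0:Int) < I ^ 2 by positivity),
          dvd_shift (I ^ 2) (k : Int) (I ^ 2) dvd_rfl, hsq, Int.natCast_dvd_natCast]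
        exact ⟨fun ⟨a, b, c⟩ => ⟨c, by exact_mod_cast a, b⟩,
               fun ⟨a, b, c⟩ => ⟨by exact_mod_cast b, c, a⟩⟩
      have hnn2 : ∀ x ∈ PySem.List.pyRange (I + I) (n + 1) I, (0 : Int) ≤ x := by
        intro x hx
        have := (PySem.List.mem_pyRange_iff_of_pos hI0 x).mp hx
        omega
      have hnn3 : ∀ x ∈ PySem.List.pyRange (I ^ 2) (n + 1) (I ^ 2), (0 : Int) ≤ x := by
        intro x hx
        have := (PySem.List.mem_pyRange_iff_of_pos (show (0:Int) < I ^ 2 by positivity) x).mp hx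
        nlinarith [this.1, sq_nonneg I]
      have hnd2 := nodup_pyRange_pos (I + I) (n + 1) I hI0
      have hnd3 := nodup_pyRange_pos (I ^ 2) (n + 1) (I ^ 2) (by positivity)
      by_cases hp : (j + 1).Prime
      · -- prime step
        have hcond : PySem.List.pyGetD st.1 I 0 ≠ 0 := by
          rw [hcondval]; exact (Pval_self j hj1').mpr hp
        have hm1 : PySem.List.pySetD st.2 I (PySem.List.pyGetD st.2 I 0 * -1)
            = st.2.set (j + 1) (Mval j (j + 1) * -1) := by
          rw [PySem.List.pySetD_of_nonneg st.2 _ (le_of_lt hI0),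
            PySem.List.pyGetD_of_nonneg st.2 0 (le_of_lt hI0), hIt,
            List.getD_eq_getElem?_getD]
          congr 2
          have := (ihE (j + 1) hjN).2
          rw [List.getD_eq_getElem?_getD] at this
          exact this
        set m1 : List Int := st.2.set (j + 1) (Mval j (j + 1) * -1) with hm1d
        have hsplit := foldl_pair (fun L k => PySem.List.pySetD L k 0)
            (fun L k => PySem.List.pySetD L k (PySem.List.pyGetD L k 0 * -1))
            (PySem.List.pyRange (I + I) (n + 1) I) st.1 m1
        have hstepEq : lsieveStepA n st I =
            ((PySem.List.pyRange (I + I) (n + 1) I).foldl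
               (fun L k => PySem.List.pySetD L k 0) st.1,
             (PySem.List.pyRange (I ^ 2) (n + 1) (I ^ 2)).foldl
               (fun m k => PySem.List.pySetD m k 0)
               ((PySem.List.pyRange (I + I) (n + 1) I).foldl
                 (fun L k => PySem.List.pySetD L k (PySem.List.pyGetD L k 0 * -1)) m1)) := by
          unfold lsieveStepA
          rw [if_pos hcond]
          show ((List.foldl (fun st k => (PySem.List.pySetD st.1 k 0,
                  PySem.List.pySetD st.2 k (PySem.List.pyGetD st.2 k 0 * -1)))
                (st.1, PySem.List.pySetD st.2 I (PySem.List.pyGetD st.2 I 0 * -1))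
                (PySem.List.pyRange (I + I) (n + 1) I)).1,
              List.foldl (fun m k => PySem.List.pySetD m k 0)
                (List.foldl (fun st k => (PySem.List.pySetD st.1 k 0,
                    PySem.List.pySetD st.2 k (PySem.List.pyGetD st.2 k 0 * -1)))
                  (st.1, PySem.List.pySetD st.2 I (PySem.List.pyGetD st.2 I 0 * -1))
                  (PySem.List.pyRange (I + I) (n + 1) I)).2
                (PySem.List.pyRange (I ^ 2) (n + 1) (I ^ 2))) = _
          rw [hm1, hsplit]
        rw [hstep, hstepEq]
        have hlen1 : ((PySem.List.pyRange (I + I) (n + 1) I).foldl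
            (fun L k => PySem.List.pySetD L k 0) st.1).length = (n + 1).toNat := by
          have := foldl_setg_length (fun _ => 0) (PySem.List.pyRange (I + I) (n + 1) I) st.1
          rw [← ihP]
          exact this
        have hlenm1 : m1.length = (n + 1).toNat := by simp [hm1d, ihM]
        have hlen2 : ((PySem.List.pyRange (I + I) (n + 1) I).foldl
            (fun L k => PySem.List.pySetD L k (PySem.List.pyGetD L k 0 * -1)) m1).length
            = (n + 1).toNat := by
          have := foldl_setg_length (fun x => x * -1) (PySem.List.pyRange (I + I) (n + 1) I) m1
          rw [← hlenm1]
          exact this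
        have hlen3 : ((PySem.List.pyRange (I ^ 2) (n + 1) (I ^ 2)).foldl
            (fun m k => PySem.List.pySetD m k 0)
            ((PySem.List.pyRange (I + I) (n + 1) I).foldl
              (fun L k => PySem.List.pySetD L k (PySem.List.pyGetD L k 0 * -1)) m1)).length
            = (n + 1).toNat := by
          have := foldl_setg_length (fun _ => 0) (PySem.List.pyRange (I ^ 2) (n + 1) (I ^ 2))
            ((PySem.List.pyRange (I + I) (n + 1) I).foldl
              (fun L k => PySem.List.pySetD L k (PySem.List.pyGetD L k 0 * -1)) m1)
          rw [← hlen2]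
          exact this
        refine ⟨hlen1, hlen3, ?_⟩
        intro k hk
        have hkn : (k : Int) < n + 1 := by omega
        constructor
        · -- primes entry
          have := foldl_setg_getD (fun _ => 0) (PySem.List.pyRange (I + I) (n + 1) I) st.1
            hnn2 hnd2 k (by omega)
          rw [this, (ihE k hk).1]
          simp only [hmem2 k]
          rw [Pval_succ]
          by_cases hd : (j + 1) ∣ k ∧ 2 * (j + 1) ≤ k
          · rw [if_pos ⟨hd.1, hd.2, hkn⟩, if_pos ⟨hp, hd.1, hd.2⟩]
          · rw [if_neg (by tauto), if_neg (by tauto)]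
        · -- mobius entry
          have e3 := foldl_setg_getD (fun _ => 0) (PySem.List.pyRange (I ^ 2) (n + 1) (I ^ 2))
            ((PySem.List.pyRange (I + I) (n + 1) I).foldl
              (fun L k => PySem.List.pySetD L k (PySem.List.pyGetD L k 0 * -1)) m1)
            hnn3 hnd3 k (by omega)
          have e2 := foldl_setg_getD (fun x => x * -1) (PySem.List.pyRange (I + I) (n + 1) I)
            m1 hnn2 hnd2 k (by omega)
          have e1 : m1.getD k 0 = if k = j + 1 then Mval j (j + 1) * -1 else Mval j k := by
            rw [hm1d, setgetD]
            by_cases he : k = j + 1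
            · rw [if_pos ⟨he.symm, by rw [ihM]; omega⟩, if_pos he]
            · rw [if_neg (by omega), if_neg he]
              exact (ihE k hk).2
          rw [e3, e2, e1]
          simp only [hmem2 k, hmem3 k]
          rw [Mval_succ_prime j k hp]
          have hpos : 0 < (j + 1) * (j + 1) := Nat.mul_pos (by omega) (by omega)
          by_cases hk0 : k = 0
          · subst hk0
            rw [if_neg (by omega), if_neg (by omega), if_neg (by omega),
              if_pos (dvd_zero _), Mval_zero]
          · have hk1 : 1 ≤ k := by omega
            by_cases hsqd : (j + 1) * (j + 1) ∣ k
            · have hle : (j + 1) * (j + 1) ≤ k := Nat.le_of_dvd (by omega) hsqd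
              rw [if_pos ⟨hsqd, hle, hkn⟩, if_pos hsqd]
            · rw [if_neg (fun hc => hsqd hc.1), if_neg hsqd]
              by_cases hd : (j + 1) ∣ k
              · have hle : j + 1 ≤ k := Nat.le_of_dvd (by omega) hd
                by_cases he : k = j + 1
                · rw [if_neg (fun hc => absurd hc.2.1 (by omega)), if_pos he, if_pos hd, he]
                  ring
                · have h2 : 2 * (j + 1) ≤ k := by
                    obtain ⟨c, hc⟩ := hd
                    have hc2 : 2 ≤ c := by
                      rcases c with _ | _ | c
                      · omega
                      · exfalso; apply he; omega
                      · omega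
                    have := Nat.mul_le_mul_left (j + 1) hc2
                    omega
                  rw [if_pos ⟨hd, h2, hkn⟩, if_neg he, if_pos hd]
                  ring
              · have hne : ¬ k = j + 1 := fun he => hd (he ▸ dvd_refl _)
                rw [if_neg (fun hc => hd hc.1), if_neg hne, if_neg hd]
      · -- composite step: no change
        have hcond : ¬ (PySem.List.pyGetD st.1 I 0 ≠ 0) := by
          rw [hcondval]
          simp only [ne_eq, not_not]
          by_contra hne
          exact hp ((Pval_self j hj1').mp hne)
        have hstepEq : lsieveStepA n st I = st := by
          unfold lsieveStepA
          rw [if_neg hcond]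
        rw [hstep, hstepEq]
        refine ⟨ihP, ihM, ?_⟩
        intro k hk
        rw [Mval_succ_comp j k hp, Pval_succ, if_neg (by tauto)]
        exact ihE k hk
def Sval (j k : Nat) : Int := if 2 ≤ k ∧ k.minFac ≤ j then (k.minFac : Int) else 0

def Muval (j k : Nat) : Int :=
  if 1 ≤ k ∧ k ≤ j then (ArithmeticFunction.moebius k : Int) else 0

lemma Sval_eq_zero_iff (j : Nat) (hj : 1 ≤ j) :
    (Sval j (j + 1) = 0) ↔ (j + 1).Prime := by
  have hpf := Nat.minFac_prime (show j + 1 ≠ 1 by omega)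
  have h2 := hpf.two_le
  have hle : (j + 1).minFac ≤ j + 1 := Nat.minFac_le (by omega)
  unfold Sval
  constructor
  · intro h
    by_cases hc : (j + 1).minFac ≤ j
    · rw [if_pos ⟨by omega, hc⟩] at h
      omega
    · exact Nat.prime_def_minFac.mpr ⟨by omega, by omega⟩
  · intro hp
    rw [if_neg]
    rintro ⟨-, hcon⟩
    have := (Nat.prime_def_minFac.mp hp).2
    omega

def SState (n : Int) (j : Nat) : List Int :=
  (PySem.List.pyRange 2 ((j : Int) + 1) 1).foldl (spfStepB n) (List.replicate (n + 1).toNat 0)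

set_option maxHeartbeats 2000000 in
lemma SInv (n : Int) (hn : 1 ≤ n) (j : Nat) (hj1 : 1 ≤ j) (hjn : (j : Int) ≤ n) :
    (SState n j).length = (n + 1).toNat ∧
    ∀ k : Nat, k < (n + 1).toNat → (SState n j).getD k 0 = Sval j k := by
  have hN : (((n + 1).toNat : Int)) = n + 1 := Int.toNat_of_nonneg (by omega)
  induction j with
  | zero => omega
  | succ j ih =>
    by_cases hj0 : j = 0
    · subst hj0
      have hr : PySem.List.pyRange 2 (((0 + 1 : Nat) : Int) + 1) 1 = [] := by
        have : (((0 + 1 : Nat) : Int) + 1) = 2 := by norm_num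
        rw [this]
        exact PySem.List.pyRange_one_eq_nil (le_refl 2)
      have hA : SState n 1 = List.replicate (n + 1).toNat 0 := by
        unfold SState
        rw [hr]
        rfl
      rw [hA]
      refine ⟨by simp, ?_⟩
      intro k hk
      rw [List.getD_eq_getElem _ _ (by simpa using hk), List.getElem_replicate]
      unfold Sval
      rw [if_neg]
      rintro ⟨hk2, hc⟩
      have := (Nat.minFac_prime (show k ≠ 1 by omega)).two_le
      omega
    · have hj1' : 1 ≤ j := by omega
      have hjn' : (j : Int) ≤ n := by push_cast at hjn ⊢; omega
      obtain ⟨ihL, ihE⟩ := ih hj1' hjn'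
      have hstep : SState n (j + 1) = spfStepB n (SState n j) ((j : Int) + 1) := by
        unfold SState
        have hc : (((j + 1 : Nat) : Int) + 1) = ((j : Int) + 1) + 1 := by push_cast; ring
        rw [hc, foldl_pyRange_one_succ (spfStepB n) 2 ((j : Int) + 1) _ (by omega)]
      set st := SState n j with hst
      set I : Int := (j : Int) + 1 with hI
      have hI0 : (0 : Int) < I := by omega
      have hIn : I ≤ n := by push_cast at hjn; omega
      have hIt : I.toNat = j + 1 := by omega
      have hjN : j + 1 < (n + 1).toNat := by omega
      have hIc : I = (((j + 1 : Nat)) : Int) := by push_cast; ring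
      have hcondval : PySem.List.pyGetD st I 0 = Sval j (j + 1) := by
        rw [PySem.List.pyGetD_of_nonneg st 0 (le_of_lt hI0), hIt]
        exact ihE (j + 1) hjN
      have hmem : ∀ k : Nat, ((k : Int) ∈ PySem.List.pyRange I (n + 1) I)
          ↔ ((j + 1) ∣ k ∧ j + 1 ≤ k ∧ (k : Int) < n + 1) := by
        intro k
        rw [PySem.List.mem_pyRange_iff_of_pos hI0,
          dvd_shift I (k : Int) I dvd_rfl, hIc, Int.natCast_dvd_natCast]
        exact ⟨fun ⟨a, b, c⟩ => ⟨c, by omega, b⟩, fun ⟨a, b, c⟩ => ⟨by omega, c, a⟩⟩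
      have hnn : ∀ x ∈ PySem.List.pyRange I (n + 1) I, (0 : Int) ≤ x := by
        intro x hx
        have := (PySem.List.mem_pyRange_iff_of_pos hI0 x).mp hx
        omega
      have hnd := nodup_pyRange_pos I (n + 1) I hI0
      by_cases hp : (j + 1).Prime
      · have hcond : PySem.List.pyGetD st I 0 = 0 := by
          rw [hcondval]
          exact (Sval_eq_zero_iff j hj1').mpr hp
        have hfold : spfStepB n st I
            = (PySem.List.pyRange I (n + 1) I).foldl
                (fun L k => PySem.List.pySetD L k
                  ((fun x => if x = 0 then I else x) (PySem.List.pyGetD L k 0))) st := by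
          unfold spfStepB
          rw [if_pos hcond]
          apply PySem.List.foldl_congr_mem
          intro acc x hx
          have hx0 : (0 : Int) ≤ x := hnn x hx
          by_cases hz : PySem.List.pyGetD acc x 0 = 0
          · rw [if_pos hz, hz]
            rfl
          · rw [if_neg hz]
            show acc = PySem.List.pySetD acc x
                (if PySem.List.pyGetD acc x 0 = 0 then I else PySem.List.pyGetD acc x 0)
            rw [if_neg hz, PySem.List.pySetD_of_nonneg acc _ hx0,
              PySem.List.pyGetD_of_nonneg acc 0 hx0, set_getD_self]
        rw [hstep, hfold]
        have hlen : ((PySem.List.pyRange I (n + 1) I).foldl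
            (fun L k => PySem.List.pySetD L k
              ((fun x => if x = 0 then I else x) (PySem.List.pyGetD L k 0))) st).length
            = (n + 1).toNat := by
          have := foldl_setg_length (fun x => if x = 0 then I else x)
            (PySem.List.pyRange I (n + 1) I) st
          rw [← ihL]
          exact this
        refine ⟨hlen, ?_⟩
        intro k hk
        have hkn : (k : Int) < n + 1 := by omega
        have e := foldl_setg_getD (fun x => if x = 0 then I else x)
          (PySem.List.pyRange I (n + 1) I) st hnn hnd k (by omega)
        rw [e, ihE k hk]
        simp only [hmem k]
        by_cases hk2 : 2 ≤ k
        · have hkn1 : k ≠ 1 := by omega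
          have hpfk := Nat.minFac_prime hkn1
          have hpf2 := hpfk.two_le
          have hpfle : k.minFac ≤ k := Nat.minFac_le (by omega)
          by_cases ha : k.minFac ≤ j
          · have hold : Sval j k = (k.minFac : Int) := by
              unfold Sval
              rw [if_pos ⟨hk2, ha⟩]
            have hnew : Sval (j + 1) k = (k.minFac : Int) := by
              unfold Sval
              rw [if_pos ⟨hk2, by omega⟩]
            rw [hold, hnew]
            have hne : ¬ ((k.minFac : Int) = 0) := by omega
            rw [if_neg hne, ite_self]
          · have hold : Sval j k = 0 := by
              unfold Sval
              rw [if_neg (fun hc => ha hc.2)]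
            rw [hold]
            by_cases hb : k.minFac = j + 1
            · have hmm : (j + 1) ∣ k ∧ j + 1 ≤ k ∧ (k : Int) < n + 1 :=
                ⟨hb ▸ Nat.minFac_dvd k, by omega, hkn⟩
              rw [if_pos hmm, if_pos rfl]
              unfold Sval
              rw [if_pos ⟨hk2, by omega⟩, hb, hIc]
            · have hmm : ¬ ((j + 1) ∣ k ∧ j + 1 ≤ k ∧ (k : Int) < n + 1) := by
                rintro ⟨hdv, -, -⟩
                have := Nat.minFac_le_of_dvd hp.two_le hdv
                omega
              rw [if_neg hmm]
              unfold Sval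
              rw [if_neg (by rintro ⟨-, hc⟩; omega)]
        · have hmm : ¬ ((j + 1) ∣ k ∧ j + 1 ≤ k ∧ (k : Int) < n + 1) := by
            rintro ⟨-, hc, -⟩
            omega
          rw [if_neg hmm]
          unfold Sval
          rw [if_neg (fun hc => hk2 hc.1), if_neg (fun hc => hk2 hc.1)]
      · have hcond : ¬ PySem.List.pyGetD st I 0 = 0 := by
          rw [hcondval]
          intro h
          exact hp ((Sval_eq_zero_iff j hj1').mp h)
        have hfold : spfStepB n st I = st := by
          unfold spfStepB
          rw [if_neg hcond]
        rw [hstep, hfold]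
        refine ⟨ihL, fun k hk => ?_⟩
        rw [ihE k hk]
        by_cases hk2 : 2 ≤ k
        · by_cases ha : k.minFac ≤ j
          · unfold Sval
            rw [if_pos ⟨hk2, ha⟩, if_pos ⟨hk2, by omega⟩]
          · have hb : k.minFac ≠ j + 1 := by
              intro hb
              exact hp (hb ▸ Nat.minFac_prime (show k ≠ 1 by omega))
            unfold Sval
            rw [if_neg (fun hc => ha hc.2), if_neg (by rintro ⟨-, hc⟩; omega)]
        · unfold Sval
          rw [if_neg (fun hc => hk2 hc.1), if_neg (fun hc => hk2 hc.1)]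
def MuInit (n : Int) : List Int :=
  if n ≥ 1 then PySem.List.pySetD (List.replicate (n + 1).toNat 0) 1 1
  else List.replicate (n + 1).toNat 0

def MuState (n : Int) (j : Nat) : List Int :=
  (PySem.List.pyRange 2 ((j : Int) + 1) 1).foldl (muStepB (SState n n.toNat)) (MuInit n)

set_option maxHeartbeats 2000000 in
lemma MuInv (n : Int) (hn : 1 ≤ n) (j : Nat) (hj1 : 1 ≤ j) (hjn : (j : Int) ≤ n) :
    (MuState n j).length = (n + 1).toNat ∧
    ∀ k : Nat, k < (n + 1).toNat → (MuState n j).getD k 0 = Muval j k := by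
  have hN : (((n + 1).toNat : Int)) = n + 1 := Int.toNat_of_nonneg (by omega)
  have hInit : MuInit n = (List.replicate (n + 1).toNat (0 : Int)).set 1 1 := by
    unfold MuInit
    rw [if_pos (by omega : n ≥ 1), PySem.List.pySetD_of_nonneg _ _ (by omega : (0:Int) ≤ 1)]
    rfl
  have hInitLen : (MuInit n).length = (n + 1).toNat := by
    rw [hInit]; simp
  have hInitE : ∀ k : Nat, k < (n + 1).toNat →
      (MuInit n).getD k 0 = Muval 1 k := by
    intro k hk
    rw [hInit, setgetD]
    unfold Muval
    by_cases he : k = 1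
    · subst he
      rw [if_pos ⟨rfl, by simp; omega⟩, if_pos ⟨le_refl 1, le_refl 1⟩,
        ArithmeticFunction.moebius_apply_one]
    · rw [if_neg (fun hc => he (hc.1.symm)), if_neg (fun hc => he (by omega)),
        List.getD_eq_getElem _ _ (by simpa using hk), List.getElem_replicate]
  induction j with
  | zero => omega
  | succ j ih =>
    by_cases hj0 : j = 0
    · subst hj0
      have hr : PySem.List.pyRange 2 (((0 + 1 : Nat) : Int) + 1) 1 = [] := by
        have : (((0 + 1 : Nat) : Int) + 1) = 2 := by norm_num
        rw [this]
        exact PySem.List.pyRange_one_eq_nil (le_refl 2)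
      have hA : MuState n 1 = MuInit n := by
        unfold MuState
        rw [hr]
        rfl
      rw [hA]
      exact ⟨hInitLen, hInitE⟩
    · have hj1' : 1 ≤ j := by omega
      have hjn' : (j : Int) ≤ n := by push_cast at hjn ⊢; omega
      obtain ⟨ihL, ihE⟩ := ih hj1' hjn'
      have hstep : MuState n (j + 1) = muStepB (SState n n.toNat) (MuState n j) ((j : Int) + 1) := by
        unfold MuState
        have hc : (((j + 1 : Nat) : Int) + 1) = ((j : Int) + 1) + 1 := by push_cast; ring
        rw [hc, foldl_pyRange_one_succ (muStepB (SState n n.toNat)) 2 ((j : Int) + 1) _ (by omega)]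
      set st := MuState n j with hst
      set I : Int := (j : Int) + 1 with hI
      have hI0 : (0 : Int) < I := by omega
      have hIn : I ≤ n := by push_cast at hjn; omega
      have hIt : I.toNat = j + 1 := by omega
      have hjN : j + 1 < (n + 1).toNat := by omega
      have hIc : I = (((j + 1 : Nat)) : Int) := by push_cast; ring
      have hpfle : (j + 1).minFac ≤ j + 1 := Nat.minFac_le (by omega)
      have hpf2 := (Nat.minFac_prime (show j + 1 ≠ 1 by omega)).two_le
      obtain ⟨sL, sE⟩ := SInv n hn n.toNat (by omega) (by omega)
      have hspf : PySem.List.pyGetD (SState n n.toNat) I 0 = (((j + 1).minFac : Nat) : Int) := by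
        rw [PySem.List.pyGetD_of_nonneg _ 0 (le_of_lt hI0), hIt, sE (j + 1) hjN]
        unfold Sval
        rw [if_pos ⟨by omega, by omega⟩]
      set pf : Nat := (j + 1).minFac with hpf
      set m' : Nat := (j + 1) / pf with hm'
      have hm'le : m' ≤ j := by
        have h1 : m' ≤ (j + 1) / 2 := by
          apply Nat.div_le_div_left hpf2 (by omega)
        have h2 : (j + 1) / 2 ≤ j := by omega
        omega
      have hm'1 : 1 ≤ m' := Nat.one_le_div_iff (by omega) |>.mpr hpfle
      have hfold : muStepB (SState n n.toNat) st I
          = st.set (j + 1)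
              (if pf ∣ m' then 0 else -(Muval j m')) := by
        unfold muStepB
        show PySem.List.pySetD st I
            (if PySem.Int.mod (PySem.Int.floordiv I (PySem.List.pyGetD (SState n n.toNat) I 0))
                (PySem.List.pyGetD (SState n n.toNat) I 0) = 0 then 0
             else -(PySem.List.pyGetD st
                (PySem.Int.floordiv I (PySem.List.pyGetD (SState n n.toNat) I 0)) 0))
          = st.set (j + 1) (if pf ∣ m' then 0 else -(Muval j m'))
        rw [hspf, hIc, PySem.Int.floordiv_natCast (j + 1) pf, PySem.Int.mod_natCast,
          PySem.List.pySetD_of_nonneg st _ (by positivity), Int.toNat_natCast]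
        congr 1
        by_cases hdv : pf ∣ m'
        · have hz : m' % pf = 0 := by
            obtain ⟨c, hc⟩ := hdv
            rw [hc]
            exact Nat.mul_mod_right pf c
          rw [if_pos (by exact_mod_cast hz), if_pos hdv]
        · rw [if_neg ?hng, if_neg hdv]
          · congr 1
            rw [PySem.List.pyGetD_of_nonneg _ 0 (by positivity), Int.toNat_natCast]
            exact ihE m' (by omega)
          case hng =>
            intro hc
            have : m' % pf = 0 := by exact_mod_cast hc
            exact hdv (Nat.dvd_of_mod_eq_zero this)
      rw [hstep, hfold]
      refine ⟨by simpa using ihL, ?_⟩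
      intro k hk
      rw [setgetD]
      by_cases he : k = j + 1
      · subst he
        rw [if_pos ⟨rfl, by omega⟩]
        have hMv : Muval (j + 1) (j + 1) = (ArithmeticFunction.moebius (j + 1) : Int) := by
          unfold Muval
          rw [if_pos ⟨by omega, le_refl (j + 1)⟩]
        rw [hMv, moebius_minFac_step (j + 1) (by omega), ← hpf, ← hm']
        have hMv2 : Muval j m' = (ArithmeticFunction.moebius m' : Int) := by
          unfold Muval
          rw [if_pos ⟨hm'1, hm'le⟩]
        rw [hMv2]
      · rw [if_neg (fun hc => he hc.1.symm), ihE k hk]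
        unfold Muval
        by_cases hc : 1 ≤ k ∧ k ≤ j
        · rw [if_pos hc, if_pos ⟨hc.1, by omega⟩]
        · rw [if_neg hc, if_neg (by rintro ⟨h1, h2⟩; exact hc ⟨h1, by omega⟩)]
def specList (n : Int) : List Int :=
  (PySem.List.pyRange 0 (n + 1) 1).map
    (fun i => i * (ArithmeticFunction.moebius i.toNat : Int))

lemma lsieve_eq (n : Int) : lsieve n = specList n := by
  by_cases h1 : n ≤ -1
  · unfold lsieve specList
    rw [PySem.List.pyRange_one_eq_nil (by omega : n + 1 ≤ 0),
      PySem.List.pyRange_one_eq_nil (by omega : n + 1 ≤ 2)]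
    rfl
  · by_cases h0 : n = 0
    · subst h0
      have hA : lsieve 0 = [0] := by decide
      have hs : specList 0 = [0] := by
        unfold specList
        have h : PySem.List.pyRange 0 (0 + 1) 1 = [0] := by decide
        rw [h]
        simp
      rw [hA, hs]
    · have hn : 1 ≤ n := by omega
      have hcast : ((n.toNat : Int)) = n := Int.toNat_of_nonneg (by omega)
      have hL : lsieve n = (AState n n.toNat).2 := by
        unfold lsieve AState
        rw [hcast]
      obtain ⟨hPL, hML, hE⟩ := AInv n hn n.toNat (by omega) (by omega)
      have hsl : (specList n).length = (n + 1).toNat := by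
        unfold specList
        rw [List.length_map, PySem.List.length_pyRange_one]
        omega
      rw [hL]
      apply List.ext_getElem
      · rw [hML, hsl]
      · intro i hi1 hi2
        have hiN : i < (n + 1).toNat := by omega
        have hgd : (AState n n.toNat).2[i] = (AState n n.toNat).2.getD i 0 := by
          rw [List.getD_eq_getElem _ _ (by omega)]
        have hsp : (specList n)[i] = (i : Int) * (ArithmeticFunction.moebius i : Int) := by
          unfold specList
          rw [List.getElem_map, PySem.List.getElem_pyRange_one]
          norm_num
        rw [hgd, hsp, hE i hiN |>.2]
        by_cases hi0 : i = 0
        · subst hi0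
          rw [Mval_zero]
          norm_num
        · rw [Mval_final n.toNat i (by omega) (by omega)]

lemma lsieve_alt_eq (n : Int) : lsieve_alt n = specList n := by
  by_cases h1 : n ≤ -1
  · unfold lsieve_alt specList
    rw [if_pos (by omega : n < 0), PySem.List.pyRange_one_eq_nil (by omega : n + 1 ≤ 0)]
    rfl
  · by_cases h0 : n = 0
    · subst h0
      have hB : lsieve_alt 0 = [0] := by decide
      have hs : specList 0 = [0] := by
        unfold specList
        have h : PySem.List.pyRange 0 (0 + 1) 1 = [0] := by decide
        rw [h]
        simp
      rw [hB, hs]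
    · have hn : 1 ≤ n := by omega
      have hcast : ((n.toNat : Int)) = n := Int.toNat_of_nonneg (by omega)
      have hB : lsieve_alt n = (PySem.List.pyRange 0 (n + 1) 1).map
          (fun i => i * PySem.List.pyGetD (MuState n n.toNat) i 0) := by
        unfold lsieve_alt MuState MuInit SState
        rw [hcast, if_neg (by omega : ¬ n < 0)]
      obtain ⟨hML, hE⟩ := MuInv n hn n.toNat (by omega) (by omega)
      rw [hB]
      unfold specList
      apply List.map_congr_left
      intro i hi
      have hmem := (PySem.List.mem_pyRange_one).mp hi
      by_cases hi0 : i = 0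
      · subst hi0
        norm_num
      · have hi1 : 1 ≤ i := by omega
        congr 1
        rw [PySem.List.pyGetD_of_nonneg _ 0 (by omega)]
        rw [hE i.toNat (by omega)]
        unfold Muval
        rw [if_pos ⟨by omega, by omega⟩]

-- ===== VERDICT (by name: the statement is the Claim_ definition above) =====
theorem lsieve_spec : Claim_equal_lsieve := by
  intro n _
  unfold Spec_lsieve
  rw [lsieve_eq, lsieve_alt_eq]
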